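-- pv_equiv track=rewrite | github.com/flowerpower13/utils | nagler_functions.py | text_to_extractlist
-- ===== SOURCE A (Python) =====
-- def text_to_extractlist(text, gram, n_chars=200):
--
--     #init extract
--     extract_list = []
--
--     #index
--     index=0
--
--     #while
--     while index < len(text):
--
--         #find
--         index = text.find(gram, index)
--
--         #if
--         if index == -1:
--
--             #break
--             break
--
--         #index
--         start_index = max(0, index - n_chars)
--         end_index = min(
--             index + len(gram) + n_chars,
--             len(text),
--             )
--
--         #text
--         extract_text = text[start_index:end_index]
--
--         #replace
--         extract_text=extract_text.replace(gram, f"###{gram}###")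
--
--         #append
--         extract_list.append(extract_text)
--         index += len(gram)
--
--     #if
--     if extract_list:
--         extract_list=str(extract_list)
--
--     #elif
--     elif not extract_list:
--         extract_list=None
--
--     #return
--     return extract_list
-- ===== SOURCE B (Python) =====
-- def text_to_extractlist(text, gram, n_chars=200):
--     # Delegate the matching to str.split: the gaps between pieces are exactly
--     # the non-overlapping leftmost occurrences of gram; recover each match
--     # position as a running sum of piece lengths, then slice & mark windows.
--     pieces = text.split(gram)  # raises ValueError on empty gram
--     if len(pieces) == 1:
--         return None
--     g = len(gram)
--     marked = f"###{gram}###"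
--     windows = []
--     pos = 0
--     for piece in pieces[:-1]:
--         pos += len(piece)
--         windows.append(
--             text[max(0, pos - n_chars):min(pos + g + n_chars, len(text))]
--             .replace(gram, marked)
--         )
--         pos += g
--     return str(windows)
-- ===== Notes on version B (the rewrite author's own statement) =====
-- stated objective: idiomatic
-- what changed: B has no search loop at all: it delegates matching to text.split(gram), recovers each match position as a running sum of piece lengths over pieces[:-1], and builds the marked windows from those sums; A scans with find/advance.
-- outside the precondition, e.g. on text_to_extractlist('', '', 5): A returns None, B raises ValueError
import Mathlib
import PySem

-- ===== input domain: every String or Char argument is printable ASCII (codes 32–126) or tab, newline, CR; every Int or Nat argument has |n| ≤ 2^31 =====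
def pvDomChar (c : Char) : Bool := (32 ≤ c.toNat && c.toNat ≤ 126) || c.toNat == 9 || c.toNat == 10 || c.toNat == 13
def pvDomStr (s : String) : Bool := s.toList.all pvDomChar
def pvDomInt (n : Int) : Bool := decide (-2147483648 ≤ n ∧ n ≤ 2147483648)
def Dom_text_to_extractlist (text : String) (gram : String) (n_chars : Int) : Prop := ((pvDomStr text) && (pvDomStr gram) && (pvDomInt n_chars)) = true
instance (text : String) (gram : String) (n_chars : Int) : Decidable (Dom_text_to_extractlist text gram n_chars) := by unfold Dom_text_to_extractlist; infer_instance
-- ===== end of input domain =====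

-- B delegates the matching to str.split and recovers positions as running sums of piece lengths; alternative/idiomatic decomposition, no speed claim.

-- shared helpers: both Pythons compute the identical window expression and the identical str(list) tail
-- Python repr() of an ASCII string (exact on the Dom alphabet: printable ASCII + tab/newline/CR)
def pyEscChar (q c : Char) : List Char :=
  if c = '\\' then ['\\', '\\']
  else if c = q then ['\\', q]
  else if c = '\t' then ['\\', 't']
  else if c = '\n' then ['\\', 'n']
  else if c = '\r' then ['\\', 'r']
  else [c]

def pyReprStr (s : List Char) : List Char :=
  let q : Char := if s.contains '\'' ∧ ¬ s.contains '"' then '"' else '\''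
  q :: s.flatMap (pyEscChar q) ++ [q]

-- str(list_of_strings) = '[' + ', '.join(repr each) + ']'
def pyStrStrList (ws : List (List Char)) : List Char :=
  '[' :: PySem.Chars.join [',', ' '] (ws.map pyReprStr) ++ [']']

-- text[max(0,p-n):min(p+len(gram)+n, len(text))].replace(gram, '###'+gram+'###')
def mkWindow (t g : List Char) (n : Int) (p : Nat) : List Char :=
  PySem.Chars.replace
    (PySem.List.slice t (some (max 0 ((p : Int) - n))) (some (min ((p : Int) + g.length + n) (t.length : Int))))
    g (['#','#','#'] ++ g ++ ['#','#','#'])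

-- ===== PORT A =====
-- A's while loop; fuel = len(text)+1 suffices whenever the Python terminates (gram ≠ '' forces index to grow)
def loopA (t g : List Char) (n : Int) : Nat → Nat → List (List Char) → List (List Char)
  | 0, _, acc => acc
  | fuel+1, index, acc =>
    if index < t.length then
      let j := PySem.Chars.findFrom t g (index : Int) none
      if j = -1 then acc
      else loopA t g n fuel (j.toNat + g.length) (acc ++ [mkWindow t g n j.toNat])
    else acc

def text_to_extractlist (text : String) (gram : String) (n_chars : Int) : Option String :=
  if loopA text.toList gram.toList n_chars (text.toList.length + 1) 0 [] = [] then none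
  else some (String.ofList (pyStrStrList (loopA text.toList gram.toList n_chars (text.toList.length + 1) 0 [])))

-- ===== PORT B =====
-- one fold step of B's 'for piece in pieces[:-1]' loop: state = (running position, windows so far)
def stepB (t g : List Char) (n : Int) (st : Nat × List (List Char)) (piece : List Char) : Nat × List (List Char) :=
  let pos := st.1 + piece.length
  (pos + g.length, st.2 ++ [mkWindow t g n pos])

def text_to_extractlist_alt (text : String) (gram : String) (n_chars : Int) : Option String :=
  if gram.toList = [] then none   -- text.split('') raises ValueError in Python; outside Pre_
  else
    let pieces := PySem.Chars.splitOn text.toList gram.toList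
    if pieces.length = 1 then none
    else some (String.ofList (pyStrStrList
      ((pieces.dropLast.foldl (stepB text.toList gram.toList n_chars) (0, [])).2)))

-- ===== PRECONDITION & SPEC =====
-- Pre_ excludes only gram = '': there Python A loops forever when text ≠ '' (and accidentally
-- returns None when text = ''), while B's text.split(gram) raises ValueError.
def Pre_text_to_extractlist (text : String) (gram : String) (n_chars : Int) : Prop :=
  gram ≠ ""
instance (text : String) (gram : String) (n_chars : Int) : Decidable (Pre_text_to_extractlist text gram n_chars) := by unfold Pre_text_to_extractlist; infer_instance

def pvWitness_text_to_extractlist : String × String × Int := ("banana", "an", 1)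

def Spec_text_to_extractlist (text : String) (gram : String) (n_chars : Int) (out : Option String) : Prop := out = text_to_extractlist_alt text gram n_chars
instance (text : String) (gram : String) (n_chars : Int) (out : Option String) : Decidable (Spec_text_to_extractlist text gram n_chars out) := by unfold Spec_text_to_extractlist; infer_instance

-- ===== CLAIM (what is proved, stated in full; the proofs are below) =====
def Claim_equal_text_to_extractlist : Prop := ∀ (text : String) (gram : String) (n_chars : Int), Dom_text_to_extractlist text gram n_chars → Pre_text_to_extractlist text gram n_chars → Spec_text_to_extractlist text gram n_chars (text_to_extractlist text gram n_chars)

-- ===== LEMMAS AND PROOFS =====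

-- the list of non-overlapping match positions of g in t from index i on (A's traversal order)
def posSpec (t g : List Char) (hg : g ≠ []) (i : Nat) : List Nat :=
  if h : i < t.length then
    let j := PySem.Chars.find (t.drop i) g
    if j = -1 then []
    else (i + j.toNat) :: posSpec t g hg (i + j.toNat + g.length)
  else []
termination_by t.length - i
decreasing_by
  have : 0 < g.length := List.length_pos_iff.mpr hg
  omega

-- sp: the split pieces of t by g (what str.split computes), fuelled
def sp (g : List Char) : Nat → List Char → List (List Char)
  | 0, t => [t]
  | fuel+1, t =>
    if PySem.Chars.find t g = -1 then [t]
    else t.take (PySem.Chars.find t g).toNat ::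
         sp g fuel (t.drop ((PySem.Chars.find t g).toNat + g.length))

-- first piece gets a prefix prepended (the characters go has already passed over)
def consFirst (pre : List Char) : List (List Char) → List (List Char)
  | [] => [pre]
  | x :: xs => (pre ++ x) :: xs

lemma find_first_eq (s g : List Char) (k : Nat) (hp : g <+: s.drop k)
    (hmin : ∀ m < k, ¬ g <+: s.drop m) : PySem.Chars.find s g = (k : Int) := by
  have hin : g <:+: s := hp.isInfix.trans (List.drop_suffix k s).isInfix
  have h0 : 0 ≤ PySem.Chars.find s g := (PySem.Chars.find_nonneg_iff s g).mpr hin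
  obtain ⟨h1, h2⟩ := PySem.Chars.find_spec h0
  rcases lt_trichotomy (PySem.Chars.find s g).toNat k with h | h | h
  · exact absurd h1 (hmin _ h)
  · omega
  · exact absurd hp (h2 k h)

-- find on a cons when g is not a prefix
lemma find_cons (c : Char) (rest g : List Char) (hnp : ¬ g <+: (c :: rest)) :
    PySem.Chars.find (c :: rest) g =
      (if PySem.Chars.find rest g = -1 then -1 else PySem.Chars.find rest g + 1) := by
  split_ifs with hf
  · rw [PySem.Chars.find_eq_neg_one_iff]
    intro hin
    rcases List.infix_cons_iff.mp hin with h | h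
    · exact hnp h
    · exact (PySem.Chars.find_eq_neg_one_iff _ _).mp hf h
  · have h0 : 0 ≤ PySem.Chars.find rest g := by
      have := PySem.Chars.neg_one_le_find rest g; omega
    obtain ⟨hpre, hmin⟩ := PySem.Chars.find_spec h0
    set k := (PySem.Chars.find rest g).toNat with hk
    have : PySem.Chars.find (c :: rest) g = ((k + 1 : Nat) : Int) := by
      apply find_first_eq
      · simpa using hpre
      · intro m hm
        match m with
        | 0 => simpa using hnp
        | m+1 =>
          simp only [List.drop_succ_cons]
          exact hmin m (by omega)
    omega

lemma sp_ne_nil (g : List Char) (fuel : Nat) (t : List Char) : sp g fuel t ≠ [] := by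
  cases fuel with
  | zero => simp [sp]
  | succ fuel => rw [sp]; split_ifs <;> simp

-- a found occurrence bounds the remaining length
lemma find_len (t g : List Char) (hg : g ≠ []) (hf : PySem.Chars.find t g ≠ -1) :
    (PySem.Chars.find t g).toNat + g.length ≤ t.length ∧ 0 < g.length := by
  have h0 : 0 ≤ PySem.Chars.find t g := by
    have := PySem.Chars.neg_one_le_find t g; omega
  obtain ⟨hpre, _⟩ := PySem.Chars.find_spec h0
  have := hpre.length_le
  simp only [List.length_drop] at this
  have hgl : 0 < g.length := List.length_pos_iff.mpr hg
  constructor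
  · have hle := PySem.Chars.find_le_length t g
    omega
  · exact hgl

lemma sp_irrel (g : List Char) (hg : g ≠ []) :
    ∀ fuel fuel' t, t.length < fuel → t.length < fuel' → sp g fuel t = sp g fuel' t := by
  intro fuel
  induction fuel with
  | zero => intro fuel' t h; omega
  | succ fuel ih =>
    intro fuel' t h h'
    cases fuel' with
    | zero => omega
    | succ fuel' =>
      rw [sp, sp]
      by_cases hf : PySem.Chars.find t g = -1
      · simp [hf]
      · obtain ⟨hlen, hgl⟩ := find_len t g hg hf
        simp only [hf]
        have hd : (t.drop ((PySem.Chars.find t g).toNat + g.length)).length < t.length := by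
          simp only [List.length_drop]; omega
        rw [ih fuel' _ (by omega) (by omega)]

-- go computes sp (with the already-passed prefix prepended to the first piece)
lemma go_eq_sp (g : List Char) (hg : g ≠ []) :
    ∀ fuel l cur acc, l.length < fuel →
      PySem.Chars.splitOn.go g fuel l cur acc
        = acc.reverse ++ consFirst cur.reverse (sp g fuel l) := by
  intro fuel
  induction fuel with
  | zero => intro l cur acc h; omega
  | succ fuel ih =>
    intro l cur acc h
    match l with
    | [] =>
      rw [PySem.Chars.splitOn.go]
      have hf : PySem.Chars.find ([] : List Char) g = -1 := by
        rw [PySem.Chars.find_eq_neg_one_iff]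
        intro hin
        exact hg (List.infix_nil.mp hin)
      simp only [sp, hf, reduceIte, consFirst]
      simp
      omega
    | c :: rest =>
      rw [PySem.Chars.splitOn.go]
      by_cases hp : g.isPrefixOf (c :: rest) = true
      · simp only [hp, if_pos]
        have hpre : g <+: (c :: rest) := List.isPrefixOf_iff_prefix.mp hp
        have hlen : g.length ≤ rest.length + 1 := by
          have := hpre.length_le; simpa using this
        have hgl : 0 < g.length := List.length_pos_iff.mpr hg
        have hh : rest.length + 1 < fuel + 1 := by simpa using h
        rw [ih _ _ _ (by simp only [List.length_drop, List.length_cons]; omega)]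
        have hf : PySem.Chars.find (c :: rest) g = ((0 : Nat) : Int) := by
          apply find_first_eq
          · simpa using hpre
          · intro m hm; omega
        rw [sp]
        simp only [hf]
        have hne : ((0 : Nat) : Int) ≠ -1 := by omega
        rw [if_neg (by omega)]
        obtain ⟨p, ps, hsp⟩ := List.exists_cons_of_ne_nil
          (sp_ne_nil g fuel ((c :: rest).drop (((0 : Nat) : Int).toNat + g.length)))
        simp only [Int.toNat_natCast, Nat.zero_add] at hsp ⊢
        rw [hsp]
        simp [consFirst]
      · simp only [hp]
        have hh : rest.length + 1 < fuel + 1 := by simpa using h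
        rw [if_neg (by simp [hp]), ih _ _ _ (by simpa using hh)]
        have hnp : ¬ g <+: (c :: rest) := fun hx => hp (List.isPrefixOf_iff_prefix.mpr hx)
        have hfc := find_cons c rest g hnp
        by_cases hf : PySem.Chars.find rest g = -1
        · have hf' : PySem.Chars.find (c :: rest) g = -1 := by rw [hfc, if_pos hf]
          cases fuel with
          | zero => simp at hh
          | succ fuel =>
            rw [sp, sp]
            simp [hf, hf', consFirst]
        · have h0 : 0 ≤ PySem.Chars.find rest g := by
            have := PySem.Chars.neg_one_le_find rest g; omega
          have hf' : PySem.Chars.find (c :: rest) g = PySem.Chars.find rest g + 1 := by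
            rw [hfc, if_neg hf]
          cases fuel with
          | zero => simp at hh
          | succ fuel =>
            obtain ⟨hlen, hgl⟩ := find_len rest g hg hf
            rw [sp, sp]
            have hne' : PySem.Chars.find (c :: rest) g ≠ -1 := by omega
            simp only [hf, hne', reduceIte]
            have ht : ((c :: rest).take (PySem.Chars.find (c :: rest) g).toNat)
                = c :: rest.take (PySem.Chars.find rest g).toNat := by
              rw [hf']
              have : (PySem.Chars.find rest g + 1).toNat
                  = (PySem.Chars.find rest g).toNat + 1 := by omega
              rw [this, List.take_succ_cons]
            have hd : ((c :: rest).drop ((PySem.Chars.find (c :: rest) g).toNat + g.length))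
                = rest.drop ((PySem.Chars.find rest g).toNat + g.length) := by
              rw [hf']
              have : (PySem.Chars.find rest g + 1).toNat + g.length
                  = ((PySem.Chars.find rest g).toNat + g.length) + 1 := by omega
              rw [this, List.drop_succ_cons]
            rw [ht, hd,
              sp_irrel g hg fuel (fuel + 1) _ (by simp only [List.length_drop]; omega)
                (by simp only [List.length_drop]; omega)]
            simp [consFirst]

lemma splitOn_eq_sp (t g : List Char) (hg : g ≠ []) :
    PySem.Chars.splitOn t g = sp g (t.length + 1) t := by
  rw [PySem.Chars.splitOn, go_eq_sp g hg (t.length + 1) t [] [] (by omega)]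
  obtain ⟨p, ps, hsp⟩ := List.exists_cons_of_ne_nil (sp_ne_nil g (t.length + 1) t)
  rw [hsp]
  simp [consFirst]

-- B's fold over pieces[:-1] produces exactly the windows at A's match positions
lemma foldB_eq (t g : List Char) (hg : g ≠ []) (n : Int) :
    ∀ fuel i ws, i ≤ t.length → t.length - i < fuel →
      (((sp g fuel (t.drop i)).dropLast).foldl (stepB t g n) (i, ws)).2
        = ws ++ (posSpec t g hg i).map (mkWindow t g n) := by
  intro fuel
  induction fuel with
  | zero => intro i ws _ h; omega
  | succ fuel ih =>
    intro i ws hi hfuel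
    rw [sp]
    by_cases hf : PySem.Chars.find (t.drop i) g = -1
    · rw [posSpec]
      simp only [hf, if_pos]
      split_ifs
      all_goals simp [hf]
    · obtain ⟨hlen, hgl⟩ := find_len (t.drop i) g hg hf
      simp only [List.length_drop] at hlen
      have hk0 : 0 ≤ PySem.Chars.find (t.drop i) g := by
        have := PySem.Chars.neg_one_le_find (t.drop i) g; omega
      set k := (PySem.Chars.find (t.drop i) g).toNat with hk
      have hik : i < t.length := by omega
      have hdd : (t.drop i).drop (k + g.length) = t.drop (i + k + g.length) := by
        rw [List.drop_drop]; ring_nf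
      rw [if_neg hf, hdd]
      obtain ⟨p, ps, hsp⟩ := List.exists_cons_of_ne_nil
        (sp_ne_nil g fuel (t.drop (i + k + g.length)))
      rw [hsp, List.dropLast_cons_of_ne_nil (by rw [← hsp]; exact sp_ne_nil g fuel _),
          ← hsp, List.foldl_cons]
      have hstep : stepB t g n (i, ws) ((t.drop i).take k)
          = (i + k + g.length, ws ++ [mkWindow t g n (i + k)]) := by
        have hkl : ((t.drop i).take k).length = k := by
          simp only [List.length_take, List.length_drop]; omega
        simp only [stepB, hkl]
      rw [hstep, ih (i + k + g.length) _ (by omega) (by omega)]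
      conv_rhs => rw [posSpec]
      simp only [hik, dif_pos, hf, reduceIte, ← hk, List.map_cons, List.append_assoc,
        List.cons_append, List.nil_append]

-- loopA computes the windows at the match positions
lemma loopA_eq (t g : List Char) (hg : g ≠ []) (n : Int) :
    ∀ fuel i acc, i ≤ t.length → t.length - i < fuel →
      loopA t g n fuel i acc = acc ++ (posSpec t g hg i).map (mkWindow t g n) := by
  have hglen : 0 < g.length := List.length_pos_iff.mpr hg
  intro fuel
  induction fuel with
  | zero => intro i acc _ h; omega
  | succ fuel ih =>
    intro i acc hile hfuel
    rw [loopA]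
    conv_rhs => rw [posSpec]
    by_cases hi : i < t.length
    · simp only [hi, if_pos, dif_pos]
      rw [PySem.Chars.findFrom_natCast t g i hile]
      rcases eq_or_ne (PySem.Chars.find (t.drop i) g) (-1) with hf | hf
      · simp [hf]
      · obtain ⟨hlen, _⟩ := find_len (t.drop i) g hg hf
        simp only [List.length_drop] at hlen
        have hne : ¬ ((i : Int) + PySem.Chars.find (t.drop i) g = -1) := by
          have := PySem.Chars.neg_one_le_find (t.drop i) g; omega
        have htn : ((i : Int) + PySem.Chars.find (t.drop i) g).toNat
            = i + (PySem.Chars.find (t.drop i) g).toNat := by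
          have := PySem.Chars.neg_one_le_find (t.drop i) g; omega
        rw [if_neg hf, if_neg hf, if_neg hne, htn,
            ih (i + (PySem.Chars.find (t.drop i) g).toNat + g.length) _ (by omega) (by omega)]
        simp
    · simp [hi]

-- the split has exactly one piece iff there is no match at all
lemma sp_length_one (t g : List Char) (hg : g ≠ []) (fuel : Nat) (h : t.length < fuel) :
    (sp g fuel t).length = 1 ↔ PySem.Chars.find t g = -1 := by
  cases fuel with
  | zero => omega
  | succ fuel =>
    rw [sp]
    by_cases hf : PySem.Chars.find t g = -1
    · simp [hf]
    · rw [if_neg hf]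
      have hpos : 0 < (sp g fuel (t.drop ((PySem.Chars.find t g).toNat + g.length))).length :=
        List.length_pos_iff.mpr (sp_ne_nil g fuel _)
      simp only [List.length_cons]
      constructor
      · intro hx; omega
      · intro hx; exact absurd hx hf

lemma posSpec_zero_nil_iff (t g : List Char) (hg : g ≠ []) :
    posSpec t g hg 0 = [] ↔ PySem.Chars.find t g = -1 := by
  rw [posSpec]
  by_cases h0 : 0 < t.length
  · simp only [h0, dif_pos, List.drop_zero]
    by_cases hf : PySem.Chars.find t g = -1 <;> simp [hf]
  · have ht : t = [] := by
      cases t with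
      | nil => rfl
      | cons c cs => simp at h0
    subst ht
    have hf : PySem.Chars.find ([] : List Char) g = -1 := by
      rw [PySem.Chars.find_eq_neg_one_iff]
      intro hin
      exact hg (List.infix_nil.mp hin)
    simp [hf]

lemma toList_ne_nil (s : String) (h : s ≠ "") : s.toList ≠ [] := by
  intro hl
  exact h (String.toList_inj.mp (by simpa using hl))

-- ===== VERDICT (by name: the statement is the Claim_ definition above) =====
theorem text_to_extractlist_spec : Claim_equal_text_to_extractlist := by
  intro text gram n_chars _ hpre
  unfold Spec_text_to_extractlist text_to_extractlist text_to_extractlist_alt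
  have hg : gram.toList ≠ [] := toList_ne_nil gram hpre
  rw [if_neg hg]
  set t := text.toList
  set g := gram.toList
  rw [splitOn_eq_sp t g hg]
  rw [loopA_eq t g hg n_chars (t.length + 1) 0 [] (by omega) (by omega)]
  by_cases hf : PySem.Chars.find t g = -1
  · have h1 : (sp g (t.length + 1) t).length = 1 :=
      (sp_length_one t g hg (t.length + 1) (by omega)).mpr hf
    have h2 : posSpec t g hg 0 = [] := (posSpec_zero_nil_iff t g hg).mpr hf
    simp [h1, h2]
  · have h1 : (sp g (t.length + 1) t).length ≠ 1 :=
      fun hx => hf ((sp_length_one t g hg (t.length + 1) (by omega)).mp hx)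
    have h2 : posSpec t g hg 0 ≠ [] :=
      fun hx => hf ((posSpec_zero_nil_iff t g hg).mp hx)
    rw [if_neg h1, if_neg (by simpa using h2)]
    have hfold := foldB_eq t g hg n_chars (t.length + 1) 0 [] (by omega) (by omega)
    simp only [List.drop_zero] at hfold
    rw [hfold]
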